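-- pv_equiv track=rewrite | github.com/zackire/fl_sa_project | crypto/stacks/algorithms/present_algo.py | _key_function_80
-- ===== SOURCE A (Python) =====
-- s_box = (0xC, 0x5, 0x6, 0xB, 0x9, 0x0, 0xA, 0xD, 0x3, 0xE, 0xF, 0x8, 0x4, 0x7, 0x1, 0x2)
--
-- def _key_function_80(key, round_count):
--     r = [1 if t == '1' else 0 for t in format(key, '080b')[::-1]]
--     h = r[-61:] + r[:-61]
--
--     round_key_int = 0
--     for index, ind_bit in enumerate(h):
--         round_key_int += (ind_bit << index)
--
--     upper_nibble = s_box[round_key_int >> 76]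
--     xor_portion = ((round_key_int >> 15) & 0x1F) ^ round_count
--     return (round_key_int & 0x0FFFFFFFFFFFFFF07FFF) + (upper_nibble << 76) + (xor_portion << 15)
-- ===== SOURCE B (Python) =====
-- s_box = (0xC, 0x5, 0x6, 0xB, 0x9, 0x0, 0xA, 0xD, 0x3, 0xE, 0xF, 0x8, 0x4, 0x7, 0x1, 0x2)
--
-- def _key_function_80(key, round_count):
--     # format(key, '080b') is sign-magnitude, so A's bit list is that of abs(key);
--     # the slice rotation of the LSB-first 80-bit list is a left-rotate by 61.
--     k = abs(key)
--     round_key_int = ((k << 61) + (k >> 19)) % (1 << 80)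
--     upper_nibble = s_box[round_key_int >> 76]
--     xor_portion = ((round_key_int >> 15) & 0x1F) ^ round_count
--     return (round_key_int & 0x0FFFFFFFFFFFFFF07FFF) + (upper_nibble << 76) + (xor_portion << 15)
-- ===== Notes on version B (the rewrite author's own statement) =====
-- stated objective: simpler
-- what changed: Replaced the 80-char binary-string formatting, bit-list building, slice rotation and the 80-step enumerate/shift reconstruction loop by one closed-form arithmetic rotation of abs(key): ((k << 61) + (k >> 19)) % 2**80 (format(key,'080b') is sign-magnitude, so A's bit list is that of abs(key)).
import Mathlib
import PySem

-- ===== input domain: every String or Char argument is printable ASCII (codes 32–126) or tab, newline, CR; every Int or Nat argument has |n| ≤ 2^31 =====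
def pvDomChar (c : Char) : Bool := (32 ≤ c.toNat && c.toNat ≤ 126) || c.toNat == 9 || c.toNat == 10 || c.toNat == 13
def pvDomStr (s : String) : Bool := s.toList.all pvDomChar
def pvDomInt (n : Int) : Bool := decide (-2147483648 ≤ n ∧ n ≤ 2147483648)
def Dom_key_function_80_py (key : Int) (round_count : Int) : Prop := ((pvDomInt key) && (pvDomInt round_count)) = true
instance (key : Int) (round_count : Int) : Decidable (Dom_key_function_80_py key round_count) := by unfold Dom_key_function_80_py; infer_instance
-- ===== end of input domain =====

-- B replaces A's bit-list construction, slice rotation and bit-by-bit reconstruction loop by a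
-- closed-form arithmetic rotation of abs(key) (format(key,'080b') is sign-magnitude); objective: simpler.

-- module constant s_box (shared context of A and B's Python modules)
def pvSBox : List Int := [0xC, 0x5, 0x6, 0xB, 0x9, 0x0, 0xA, 0xD, 0x3, 0xE, 0xF, 0x8, 0x4, 0x7, 0x1, 0x2]

-- ===== PORT A =====
-- binary digits of n, MSB first; format(n,'b') for n > 0 (exact, hand-ported: PySem has no format)
def pvBinDigits : Nat → List Char
  | 0 => []
  | n+1 => pvBinDigits ((n+1)/2) ++ [if (n+1) % 2 = 1 then '1' else '0']
decreasing_by exact Nat.div_lt_self (Nat.succ_pos n) (by omega)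

-- format(key, '080b'): sign-magnitude, '0'-padded after the sign to total width 80 (exact)
def pvFormat080 (key : Int) : List Char :=
  let mag := if key.natAbs = 0 then ['0'] else pvBinDigits key.natAbs
  if key < 0 then '-' :: (List.replicate (80 - (mag.length + 1)) '0' ++ mag)
  else List.replicate (80 - mag.length) '0' ++ mag

def key_function_80_py (key : Int) (round_count : Int) : Int :=
  let r : List Int := (pvFormat080 key).reverse.map (fun t => if t = '1' then (1 : Int) else 0)
  let h := PySem.List.slice r (some (-61)) none ++ PySem.List.slice r none (some (-61))
  let round_key_int := (PySem.List.enumerate h 0).foldl (fun acc p => acc + (p.2 <<< p.1.toNat)) 0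
  -- s_box[...]: in range whenever the Python returns (IndexError otherwise, unreachable on Dom); index ≥ 0 here
  let upper_nibble := (PySem.List.pyGet? pvSBox (round_key_int >>> (76:Nat))).getD 0
  let xor_portion := PySem.Int.bxor (PySem.Int.band (round_key_int >>> (15:Nat)) 0x1F) round_count
  (PySem.Int.band round_key_int 0x0FFFFFFFFFFFFFF07FFF) + (upper_nibble <<< (76:Nat)) + (xor_portion <<< (15:Nat))

-- ===== PORT B =====
def key_function_80_py_alt (key : Int) (round_count : Int) : Int :=
  let k : Int := |key|
  let round_key_int := PySem.Int.mod ((k <<< (61:Nat)) + (k >>> (19:Nat))) ((1:Int) <<< (80:Nat))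
  let upper_nibble := (PySem.List.pyGet? pvSBox (round_key_int >>> (76:Nat))).getD 0
  let xor_portion := PySem.Int.bxor (PySem.Int.band (round_key_int >>> (15:Nat)) 0x1F) round_count
  (PySem.Int.band round_key_int 0x0FFFFFFFFFFFFFF07FFF) + (upper_nibble <<< (76:Nat)) + (xor_portion <<< (15:Nat))

-- ===== PRECONDITION & SPEC =====
def Spec_key_function_80_py (key : Int) (round_count : Int) (out : Int) : Prop := out = key_function_80_py_alt key round_count
instance (key : Int) (round_count : Int) (out : Int) : Decidable (Spec_key_function_80_py key round_count out) := by unfold Spec_key_function_80_py; infer_instance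

-- ===== CLAIM (what is proved, stated in full; the proofs are below) =====
def Claim_equal_key_function_80_py : Prop := ∀ (key : Int) (round_count : Int), Dom_key_function_80_py key round_count → Spec_key_function_80_py key round_count (key_function_80_py key round_count)

-- ===== LEMMAS AND PROOFS =====

-- bit i of k, as the 0/1 integer A's list holds
def pvBitf (k : Nat) (i : Nat) : Int := if k.testBit i then 1 else 0

def pvBits (k n : Nat) : List Int := (List.range n).map (pvBitf k)

def pvChr (t : Char) : Int := if t = '1' then 1 else 0

-- value of an LSB-first bit list
def pvVal : List Int → Int
  | [] => 0
  | b :: l => b + 2 * pvVal l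

theorem pvBits_succ (k n : Nat) : pvBits k (n+1) = pvBitf k 0 :: pvBits (k/2) n := by
  unfold pvBits
  rw [List.range_succ_eq_map, List.map_cons, List.map_map]
  congr 1
  apply List.map_congr_left
  intro i _
  simp [Function.comp, pvBitf, Nat.testBit_add_one]

theorem pvBinDigits_spec : ∀ n : Nat,
    (pvBinDigits n).reverse.map pvChr = pvBits n (pvBinDigits n).length ∧ n < 2 ^ (pvBinDigits n).length := by
  intro n
  induction n using Nat.strong_induction_on with
  | _ n ih =>
    match n with
    | 0 => simp [pvBinDigits, pvBits]
    | m+1 =>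
      have hrec := ih ((m+1)/2) (Nat.div_lt_self (Nat.succ_pos m) (by omega))
      rw [pvBinDigits]
      constructor
      · rw [List.reverse_append, List.reverse_singleton, List.singleton_append,
          List.length_append, List.length_singleton, List.map_cons, hrec.1, pvBits_succ]
        congr 1
        · unfold pvChr pvBitf
          rw [Nat.testBit_zero]
          rcases Nat.mod_two_eq_zero_or_one (m+1) with h | h <;> simp [h]
      · rw [List.length_append, List.length_singleton, pow_succ]
        have := hrec.2
        have h2 := Nat.div_add_mod (m+1) 2
        omega

theorem pvBinDigits_len_le : ∀ (n w : Nat), n < 2 ^ w → (pvBinDigits n).length ≤ w := by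
  intro n
  induction n using Nat.strong_induction_on with
  | _ n ih =>
    match n with
    | 0 => intro w _; simp [pvBinDigits]
    | m+1 =>
      intro w hw
      have hw1 : 1 ≤ w := by
        by_contra h
        interval_cases w; omega
      have : (m+1)/2 < 2 ^ (w-1) := by
        have : 2 ^ w = 2 * 2 ^ (w-1) := by
          conv_lhs => rw [show w = (w-1)+1 by omega]
          ring
        omega
      have := ih ((m+1)/2) (Nat.div_lt_self (Nat.succ_pos m) (by omega)) (w-1) this
      rw [pvBinDigits, List.length_append, List.length_singleton]
      omega

theorem pvBits_pad (k L p : Nat) (hk : k < 2 ^ L) :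
    pvBits k L ++ List.replicate p (0 : Int) = pvBits k (L + p) := by
  unfold pvBits
  rw [List.range_add, List.map_append, List.map_map]
  congr 1
  symm
  rw [List.eq_replicate_iff]
  refine ⟨by simp, ?_⟩
  intro b hb
  simp only [List.mem_map, List.mem_range, Function.comp] at hb
  obtain ⟨i, _, rfl⟩ := hb
  have hlt : k < 2 ^ (L + i) := lt_of_lt_of_le hk (Nat.pow_le_pow_right (by omega) (by omega))
  simp [pvBitf, Nat.testBit_lt_two_pow hlt]

-- the bit list A builds equals the LSB-first 80-bit list of |key|
theorem pvR_spec (key : Int) (hk : key.natAbs ≤ 2 ^ 31) :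
    (pvFormat080 key).reverse.map pvChr = pvBits key.natAbs 80 := by
  set k := key.natAbs with hkdef
  have hmag : (if k = 0 then ['0'] else pvBinDigits k).reverse.map pvChr
      = pvBits k (if k = 0 then ['0'] else pvBinDigits k).length ∧
      k < 2 ^ (if k = 0 then ['0'] else pvBinDigits k).length := by
    by_cases h0 : k = 0
    · simp [h0, pvBits, pvChr, pvBitf]
    · simp only [h0, if_false]; exact pvBinDigits_spec k
  have hlen : (if k = 0 then ['0'] else pvBinDigits k).length ≤ 32 := by
    by_cases h0 : k = 0
    · simp [h0]
    · simp only [h0, if_false]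
      exact pvBinDigits_len_le k 32 (by omega)
  set mag := if k = 0 then ['0'] else pvBinDigits k with hmagdef
  unfold pvFormat080
  rw [← hkdef, ← hmagdef]
  by_cases hneg : key < 0
  · simp only [hneg, if_true]
    rw [List.reverse_cons, List.reverse_append, List.reverse_replicate, List.map_append,
      List.map_append, hmag.1, List.map_replicate]
    have hchr0 : pvChr '0' = 0 := by decide
    have hchrm : List.map pvChr ['-'] = [(0 : Int)] := by decide
    rw [hchr0, hchrm]
    rw [pvBits_pad k mag.length (80 - (mag.length + 1)) hmag.2]
    have h79 : mag.length + (80 - (mag.length + 1)) = 79 := by omega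
    rw [h79]
    have : pvBits k 80 = pvBits k 79 ++ [pvBitf k 79] := by
      unfold pvBits
      rw [show (80 : Nat) = 79 + 1 from rfl, List.range_succ, List.map_append]
      rfl
    rw [this]
    congr 1
    simp [pvBitf, Nat.testBit_lt_two_pow (lt_of_le_of_lt hk (by norm_num : (2:Nat)^31 < 2^79))]
  · simp only [hneg, if_false]
    rw [List.reverse_append, List.reverse_replicate, List.map_append, hmag.1, List.map_replicate]
    have hchr0 : pvChr '0' = 0 := by decide
    rw [hchr0, pvBits_pad k mag.length (80 - mag.length) hmag.2]
    congr 1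
    omega

-- the enumerate/foldl reconstruction computes pvVal
theorem pvFoldE (l : List Int) : ∀ (s : Nat) (acc : Int),
    (PySem.List.enumerate l (s : Int)).foldl (fun acc p => acc + (p.2 <<< p.1.toNat)) acc
      = acc + 2 ^ s * pvVal l := by
  induction l with
  | nil => intro s acc; simp [PySem.List.enumerate_nil, pvVal]
  | cons b t ih =>
    intro s acc
    rw [PySem.List.enumerate_cons, List.foldl_cons]
    have : ((s : Int) + 1) = ((s + 1 : Nat) : Int) := by push_cast; ring
    rw [this, ih (s+1)]
    simp only [Int.toNat_natCast, Int.shiftLeft_eq, pvVal, pow_succ]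
    ring

theorem pvVal_append (l1 l2 : List Int) : pvVal (l1 ++ l2) = pvVal l1 + 2 ^ l1.length * pvVal l2 := by
  induction l1 with
  | nil => simp [pvVal]
  | cons b t ih => simp [pvVal, ih, pow_succ]; ring

theorem pvVal_bits : ∀ (n k : Nat), pvVal (pvBits k n) = ((k % 2 ^ n : Nat) : Int) := by
  intro n
  induction n with
  | zero => intro k; simp [pvBits, pvVal]
  | succ n ih =>
    intro k
    rw [pvBits_succ, pvVal, ih]
    have : 2 ^ (n+1) = 2 * 2 ^ n := by ring
    rw [this, Nat.mod_mul]
    unfold pvBitf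
    rw [Nat.testBit_zero]
    rcases Nat.mod_two_eq_zero_or_one k with h | h <;> simp [h]

theorem pvBits_drop19 (k : Nat) :
    (pvBits k 80).drop 19 = pvBits (k / 2 ^ 19) 61 := by
  unfold pvBits
  rw [show (80:Nat) = 19 + 61 from rfl, List.range_add, List.map_append,
    List.drop_left' (by simp), List.map_map]
  apply List.map_congr_left
  intro i _
  simp only [Function.comp, pvBitf]
  rw [← Nat.shiftRight_eq_div_pow, Nat.testBit_shiftRight]

theorem pvBits_take19 (k : Nat) : (pvBits k 80).take 19 = pvBits k 19 := by
  unfold pvBits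
  rw [show (80:Nat) = 19 + 61 from rfl, List.range_add, List.map_append,
    List.take_left' (by simp)]

-- ===== VERDICT (by name: the statement is the Claim_ definition above) =====
theorem key_function_80_py_spec : Claim_equal_key_function_80_py := by
  intro key rc hDom
  have hk : key.natAbs ≤ 2 ^ 31 := by
    simp only [Dom_key_function_80_py, pvDomInt, Bool.and_eq_true, decide_eq_true_eq] at hDom
    omega
  unfold Spec_key_function_80_py
  simp only [key_function_80_py, key_function_80_py_alt]
  set k := key.natAbs with hkdef
  -- A's r list
  have hr : (pvFormat080 key).reverse.map (fun t => if t = '1' then (1:Int) else 0) = pvBits k 80 := by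
    have := pvR_spec key hk
    simpa [pvChr] using this
  rw [hr]
  have hlen : (pvBits k 80).length = 80 := by simp [pvBits]
  -- the slices
  rw [PySem.List.slice_from_neg_ofNat _ 61 (by omega), PySem.List.slice_to_neg_ofNat _ 61 (by omega),
    hlen]
  rw [show (80 - 61 : Nat) = 19 from rfl, pvBits_drop19, pvBits_take19]
  -- the reconstruction loop
  rw [show (0:Int) = ((0:Nat):Int) from rfl, pvFoldE, pvVal_append,
    show ((pvBits (k / 2 ^ 19) 61).length) = 61 from by simp [pvBits],
    pvVal_bits, pvVal_bits]
  -- B's closed form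
  have habs : |key| = (k : Int) := Int.abs_eq_natAbs key
  rw [habs]
  have hsl : ((k : Int) <<< (61:Nat)) = ((k <<< 61 : Nat) : Int) := by
    rw [Int.shiftLeft_eq, Nat.shiftLeft_eq]; push_cast; ring
  have hsr : ((k : Int) >>> (19:Nat)) = ((k >>> 19 : Nat) : Int) := rfl
  rw [hsl, hsr]
  have hmod : PySem.Int.mod (((k <<< 61 : Nat) : Int) + ((k >>> 19 : Nat) : Int)) ((1:Int) <<< (80:Nat))
      = (((k <<< 61) + (k >>> 19)) % (2 ^ 80) : Nat) := by
    rw [show ((1:Int) <<< (80:Nat)) = ((2 ^ 80 : Nat) : Int) by rw [Int.shiftLeft_eq]; norm_num]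
    rw [show ((k <<< 61 : Nat) : Int) + ((k >>> 19 : Nat) : Int) = (((k <<< 61) + (k >>> 19) : Nat) : Int) by push_cast; ring]
    exact PySem.Int.mod_natCast _ _
  rw [hmod]
  rw [show ((k <<< 61) + (k >>> 19)) % 2 ^ 80 = k / 2 ^ 19 % 2 ^ 61 + 2 ^ 61 * (k % 2 ^ 19) by
    rw [Nat.shiftLeft_eq, Nat.shiftRight_eq_div_pow]
    have h1 : k * 2 ^ 61 + k / 2 ^ 19 = 2 ^ 80 * (k / 2 ^ 19) + (2 ^ 61 * (k % 2 ^ 19) + k / 2 ^ 19) := by omega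
    have h2 : 2 ^ 61 * (k % 2 ^ 19) + k / 2 ^ 19 < 2 ^ 80 := by omega
    have h3 : k / 2 ^ 19 % 2 ^ 61 = k / 2 ^ 19 := Nat.mod_eq_of_lt (by omega)
    rw [h1, Nat.mul_add_mod, Nat.mod_eq_of_lt h2, h3]
    omega]
  have hfin : ((0:Nat):Int) + 2 ^ (0:Nat) * (((k / 2 ^ 19 % 2 ^ 61 : Nat) : Int) + 2 ^ 61 * ((k % 2 ^ 19 : Nat) : Int))
      = ((k / 2 ^ 19 % 2 ^ 61 + 2 ^ 61 * (k % 2 ^ 19) : Nat) : Int) := by push_cast; ring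
  rw [hfin]
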